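-- pv_equiv track=rewrite | github.com/yunha-kwon/yooooonHub | 프로그래머스/2/12914. 멀리 뛰기/멀리 뛰기.py | solution
-- ===== SOURCE A (Python) =====
-- def solution(n):
--     if n < 3:
--         return n
--
--     fibo = [0] * (n+1)
--     fibo[1] = 1
--     fibo[2] = 2
--
--     for i in range(3, n+1):
--         fibo[i] = fibo[i-2] + fibo[i-1]
--
--     return fibo[n] % 1234567
-- ===== SOURCE B (Python) =====
-- def solution(n):
--     if n < 3:
--         return n
--     M = 1234567
--
--     def fd(k):
--         # returns (F(k) % M, F(k+1) % M) for the Fibonacci sequence F(0)=0, F(1)=1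
--         if k == 0:
--             return (0, 1)
--         a, b = fd(k >> 1)
--         c = (a * ((2 * b - a) % M)) % M
--         d = (a * a + b * b) % M
--         if k & 1:
--             return (d, (c + d) % M)
--         return (c, d)
--
--     return fd(n + 1)[0]
-- ===== Notes on version B (the rewrite author's own statement) =====
-- stated objective: faster
-- what changed: Replaced the O(n) DP array that fills every sequence value up to n with O(log n) fast-doubling recursion computing the (n+1)-th Fibonacci number under the problem's modulus directly.
import Mathlib
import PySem

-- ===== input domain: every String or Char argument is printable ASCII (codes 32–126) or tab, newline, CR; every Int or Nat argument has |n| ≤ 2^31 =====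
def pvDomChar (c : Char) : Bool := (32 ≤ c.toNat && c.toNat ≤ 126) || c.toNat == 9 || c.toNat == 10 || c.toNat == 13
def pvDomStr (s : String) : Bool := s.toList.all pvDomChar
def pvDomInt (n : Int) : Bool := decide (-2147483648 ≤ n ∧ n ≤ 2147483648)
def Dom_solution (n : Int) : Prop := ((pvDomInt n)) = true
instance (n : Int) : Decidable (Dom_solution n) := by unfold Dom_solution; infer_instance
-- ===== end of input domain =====

-- B replaces A's O(n) DP array with O(log n) fast-doubling modular recursion (objective: faster).

-- ===== PORT A =====
def solution (n : Int) : Int :=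
  if n < 3 then n
  else
    let fibo := List.replicate (n + 1).toNat (0 : Int)
    let fibo := PySem.List.pySetD fibo 1 1
    let fibo := PySem.List.pySetD fibo 2 2
    let fibo := (PySem.List.pyRange 3 (n + 1) 1).foldl
      (fun f i =>
        PySem.List.pySetD f i (PySem.List.pyGetD f (i - 2) 0 + PySem.List.pyGetD f (i - 1) 0))
      fibo
    -- every index above is nonnegative and in range (n ≥ 3), so pySetD/pyGetD are exact here
    PySem.Int.mod (PySem.List.pyGetD fibo n 0) 1234567

-- ===== PORT B =====
-- fast-doubling helper from Source B: fd k = (F(k) % M, F(k+1) % M), recursing on k >> 1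
def fdAlt (k : Nat) : Int × Int :=
  if _h : k = 0 then (0, 1)
  else
    let p := fdAlt (k / 2)
    let a := p.1
    let b := p.2
    let c := PySem.Int.mod (a * (PySem.Int.mod (2 * b - a) 1234567)) 1234567
    let d := PySem.Int.mod (a * a + b * b) 1234567
    if k % 2 = 1 then (d, PySem.Int.mod (c + d) 1234567) else (c, d)
termination_by k
decreasing_by exact Nat.div_lt_self (Nat.pos_of_ne_zero _h) (by omega)

def solution_alt (n : Int) : Int :=
  if n < 3 then n
  else (fdAlt (n + 1).toNat).1

-- ===== PRECONDITION & SPEC =====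
def Spec_solution (n : Int) (out : Int) : Prop := out = solution_alt n
instance (n : Int) (out : Int) : Decidable (Spec_solution n out) := by unfold Spec_solution; infer_instance

-- ===== CLAIM (what is proved, stated in full; the proofs are below) =====
def Claim_equal_solution : Prop := ∀ (n : Int), Dom_solution n → Spec_solution n (solution n)

-- ===== LEMMAS AND PROOFS =====

theorem modmul (M x y : Int) : ((x % M) * ((2 * (y % M) - x % M) % M)) % M = (x * (2 * y - x)) % M := by
  have ex : Int.ModEq M (x % M) x := Int.emod_emod_of_dvd x dvd_rfl
  have ey : Int.ModEq M (y % M) y := Int.emod_emod_of_dvd y dvd_rfl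
  exact ex.mul ((Int.emod_emod_of_dvd _ dvd_rfl).trans ((ey.mul_left 2).sub ex))

theorem modsq (M x y : Int) : ((x % M) * (x % M) + (y % M) * (y % M)) % M = (x * x + y * y) % M := by
  have ex : Int.ModEq M (x % M) x := Int.emod_emod_of_dvd x dvd_rfl
  have ey : Int.ModEq M (y % M) y := Int.emod_emod_of_dvd y dvd_rfl
  exact (ex.mul ex).add (ey.mul ey)

theorem modadd (M x y : Int) : ((x % M) + (y % M)) % M = (x + y) % M := by
  have ex : Int.ModEq M (x % M) x := Int.emod_emod_of_dvd x dvd_rfl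
  have ey : Int.ModEq M (y % M) y := Int.emod_emod_of_dvd y dvd_rfl
  exact ex.add ey

theorem fib_cast_two_mul (j : Nat) :
    ((Nat.fib (2 * j) : Int)) = (Nat.fib j : Int) * (2 * (Nat.fib (j + 1) : Int) - (Nat.fib j : Int)) := by
  have hle : Nat.fib j ≤ 2 * Nat.fib (j + 1) := le_trans (Nat.fib_le_fib_succ) (by omega)
  rw [Nat.fib_two_mul]
  push_cast [Nat.cast_sub hle]
  ring

theorem fib_cast_two_mul_add_one (j : Nat) :
    ((Nat.fib (2 * j + 1) : Int)) = (Nat.fib j : Int) * (Nat.fib j : Int) + (Nat.fib (j + 1) : Int) * (Nat.fib (j + 1) : Int) := by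
  rw [Nat.fib_two_mul_add_one]
  push_cast
  ring

theorem fdAlt_correct (k : Nat) :
    fdAlt k = ((Nat.fib k : Int) % 1234567, (Nat.fib (k + 1) : Int) % 1234567) := by
  induction k using Nat.strong_induction_on with
  | _ k ih =>
    rw [fdAlt]
    by_cases h0 : k = 0
    · subst h0; norm_num
    · rw [dif_neg h0, ih (k / 2) (Nat.div_lt_self (Nat.pos_of_ne_zero h0) one_lt_two)]
      have hM : (0:Int) < 1234567 := by norm_num
      simp only [PySem.Int.mod_eq_emod_of_pos hM]
      set j := k / 2 with hj
      by_cases hpar : k % 2 = 1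
      · have hk : k = 2 * j + 1 := by omega
        simp only [hpar]
        rw [modmul, modsq, modadd]
        simp only [if_true, Prod.mk.injEq]
        constructor
        · rw [hk, fib_cast_two_mul_add_one]
        · have h1 : k + 1 = 2 * j + 1 + 1 := by omega
          rw [h1]
          congr 1
          rw [Nat.fib_add_two]
          push_cast
          rw [fib_cast_two_mul, fib_cast_two_mul_add_one]
      · have hk : k = 2 * j := by omega
        simp only [hpar]
        rw [modmul, modsq]
        simp only [if_false, Prod.mk.injEq]
        constructor
        · rw [hk, fib_cast_two_mul]
        · have h1 : k + 1 = 2 * j + 1 := by omega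
          rw [h1, fib_cast_two_mul_add_one]

-- invariant of A's filling loop: after the first m iterations, entries 1..2+m hold F(2)..F(3+m)
theorem loopA (n : Int) (hn : 3 ≤ n) (m : Nat) (hm : (m:Int) ≤ n - 2) :
    ((PySem.List.pyRange 3 (3 + m)).foldl
      (fun f i =>
        PySem.List.pySetD f i (PySem.List.pyGetD f (i - 2) 0 + PySem.List.pyGetD f (i - 1) 0))
      (PySem.List.pySetD (PySem.List.pySetD (List.replicate (n + 1).toNat (0:Int)) 1 1) 2 2)).length
      = (n + 1).toNat ∧
    ∀ k : Nat, 1 ≤ k → (k:Int) ≤ 2 + m →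
      ((PySem.List.pyRange 3 (3 + m)).foldl
          (fun f i =>
            PySem.List.pySetD f i (PySem.List.pyGetD f (i - 2) 0 + PySem.List.pyGetD f (i - 1) 0))
          (PySem.List.pySetD (PySem.List.pySetD (List.replicate (n + 1).toNat (0:Int)) 1 1) 2 2)).getD
        k 0 = (Nat.fib (k + 1) : Int) := by
  have hinit : PySem.List.pySetD (PySem.List.pySetD (List.replicate (n + 1).toNat (0:Int)) 1 1) 2 2
      = ((List.replicate (n + 1).toNat (0:Int)).set 1 1).set 2 2 := by
    rw [PySem.List.pySetD_of_nonneg _ _ (by norm_num), PySem.List.pySetD_of_nonneg _ _ (by norm_num)]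
    simp
  induction m with
  | zero =>
    rw [show ((3:Int) + (0:Nat)) = 3 by norm_num, PySem.List.pyRange_one_eq_nil le_rfl]
    simp only [List.foldl_nil, hinit]
    refine ⟨by simp, ?_⟩
    intro k hk1 hk2
    have hk : k = 1 ∨ k = 2 := by omega
    have h1 : 1 < (n+1).toNat := by omega
    have h2 : 2 < (n+1).toNat := by omega
    rcases hk with rfl | rfl <;>
      simp [List.getD, h1, h2, Nat.fib]
  | succ m ih =>
    have hm' : (m:Int) ≤ n - 2 := by push_cast at hm ⊢; omega
    obtain ⟨ihlen, ihget⟩ := ih hm'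
    rw [show ((3:Int) + ((m:Nat)+1:Nat)) = (3 + (m:Nat)) + 1 by push_cast; ring,
        PySem.List.pyRange_one_succ_right (by omega), List.foldl_append]
    simp only [List.foldl_cons, List.foldl_nil]
    set L := (PySem.List.pyRange 3 (3 + m)).foldl
      (fun f i =>
        PySem.List.pySetD f i (PySem.List.pyGetD f (i - 2) 0 + PySem.List.pyGetD f (i - 1) 0))
      (PySem.List.pySetD (PySem.List.pySetD (List.replicate (n + 1).toNat (0:Int)) 1 1) 2 2) with hL
    have hset : PySem.List.pySetD L ((3:Int) + (m:Nat))
          (PySem.List.pyGetD L (((3:Int) + (m:Nat)) - 2) 0 + PySem.List.pyGetD L (((3:Int) + (m:Nat)) - 1) 0)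
        = L.set (3 + m) ((Nat.fib (3 + m + 1) : Int)) := by
      rw [PySem.List.pySetD_of_nonneg _ _ (by positivity),
          PySem.List.pyGetD_of_nonneg _ _ (by omega),
          PySem.List.pyGetD_of_nonneg _ _ (by omega)]
      have t0 : ((3:Int) + (m:Nat)).toNat = 3 + m := by omega
      have t2 : (((3:Int) + (m:Nat)) - 2).toNat = 1 + m := by omega
      have t1 : (((3:Int) + (m:Nat)) - 1).toNat = 2 + m := by omega
      rw [t0, t2, t1, ihget (1+m) (by omega) (by push_cast; omega),
          ihget (2+m) (by omega) (by push_cast; omega)]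
      congr 1
      rw [show 3 + m + 1 = (1 + m + 1) + 2 by ring, Nat.fib_add_two]
      push_cast
      rw [show 2 + m + 1 = 1 + m + 1 + 1 by ring]
    rw [hset]
    have hlt : 3 + m < L.length := by rw [ihlen]; omega
    constructor
    · rw [List.length_set, ihlen]
    · intro k hk1 hk2
      rw [List.getD, List.getElem?_set]
      by_cases hke : 3 + m = k
      · rw [if_pos hke, if_pos hlt]
        simp [← hke]
      · rw [if_neg hke]
        exact ihget k hk1 (by push_cast at hk2 ⊢; omega)

theorem solutionA_fib (n : Int) (h : ¬ n < 3) :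
    solution n = (Nat.fib ((n + 1).toNat) : Int) % 1234567 := by
  have hn : 3 ≤ n := by omega
  unfold solution
  rw [if_neg h]
  obtain ⟨hlen, hget⟩ := loopA n hn (n - 2).toNat (by omega)
  rw [PySem.Int.mod_eq_emod_of_pos (by norm_num)]
  congr 1
  rw [show PySem.List.pyRange 3 (n + 1) = PySem.List.pyRange 3 (3 + ((n - 2).toNat : Int)) from by
        congr 1; omega,
      PySem.List.pyGetD_of_nonneg _ _ (by omega),
      hget n.toNat (by omega) (by omega)]
  have : (n + 1).toNat = n.toNat + 1 := by omega
  rw [this]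

-- ===== VERDICT (by name: the statement is the Claim_ definition above) =====
theorem solution_spec : Claim_equal_solution := by
  intro n _
  unfold Spec_solution solution_alt
  by_cases h : n < 3
  · simp [solution, h]
  · simp only [h, if_false]
    rw [solutionA_fib n h, fdAlt_correct]
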